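-- pv_equiv track=rewrite | github.com/pytorch/pytorch | .venv311/lib/python3.11/site-packages/networkx/algorithms/threshold.py | triangle_sequence
-- ===== SOURCE A (Python) =====
-- def triangle_sequence(creation_sequence):
--     """
--     Return triangle sequence for the given threshold graph creation sequence.
--
--     """
--     cs = creation_sequence
--     seq = []
--     dr = cs.count("d")  # number of d's to the right of the current pos
--     dcur = (dr - 1) * (dr - 2) // 2  # number of triangles through a node of clique dr
--     irun = 0  # number of i's in the last run
--     drun = 0  # number of d's in the last run
--     for i, sym in enumerate(cs):
--         if sym == "d":
--             drun += 1
--             tri = dcur + (dr - 1) * irun  # new triangles at this d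
--         else:  # cs[i]="i":
--             if prevsym == "d":  # new string of i's
--                 dcur += (dr - 1) * irun  # accumulate shared shortest paths
--                 irun = 0  # reset i run counter
--                 dr -= drun  # reduce number of d's to right
--                 drun = 0  # reset d run counter
--             irun += 1
--             tri = dr * (dr - 1) // 2  # new triangles at this i
--         seq.append(tri)
--         prevsym = sym
--     return seq
-- ===== SOURCE B (Python) =====
-- def triangle_sequence(creation_sequence):
--     cs = creation_sequence
--     if cs and cs[0] != "d":
--         # a threshold-graph creation sequence starts with an isolated-at-creation 'd' node
--         raise ValueError("creation sequence must start with 'd'")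
--     seq = []
--     total = cs.count("d")
--     seen = 0   # number of d's at positions < x
--     sp = 0     # sum of positions of d's before x
--     for x, sym in enumerate(cs):
--         if sym == "d":
--             da = total - seen - 1  # d's after x
--             seq.append(sp + x * da + da * (da - 1) // 2)
--             sp += x
--             seen += 1
--         else:
--             da = total - seen
--             seq.append(da * (da - 1) // 2)
--     return seq
-- ===== Notes on version B (the rewrite author's own statement) =====
-- stated objective: simpler
-- what changed: Replaces A's run-based incremental accumulator (five interacting state variables dr/dcur/irun/drun/prevsym updated at run boundaries) with a single pass computing each node's triangle count from a closed-form formula over a prefix sum of earlier d-positions and the count of remaining d's.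
import Mathlib
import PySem

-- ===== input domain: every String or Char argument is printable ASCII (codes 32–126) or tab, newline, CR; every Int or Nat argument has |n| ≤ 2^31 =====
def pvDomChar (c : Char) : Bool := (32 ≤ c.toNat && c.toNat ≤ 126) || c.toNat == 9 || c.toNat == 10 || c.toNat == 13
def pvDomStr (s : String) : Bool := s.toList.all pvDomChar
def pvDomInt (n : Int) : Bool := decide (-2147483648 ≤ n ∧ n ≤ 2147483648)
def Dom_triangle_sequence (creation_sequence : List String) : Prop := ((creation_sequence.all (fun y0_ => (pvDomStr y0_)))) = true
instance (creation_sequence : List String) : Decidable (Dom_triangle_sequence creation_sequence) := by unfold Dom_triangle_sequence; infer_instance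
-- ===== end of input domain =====

-- B replaces A's run-based incremental accumulator (dr/dcur/irun/drun/prevsym) by a
-- per-position closed-form count from prefix sums; same O(n) cost, simpler state.

-- ===== PORT A =====
-- A's loop state: dr, dcur, irun, drun, prevsym. Python's unbound 'prevsym' at the
-- first iteration is modelled as Option String = none: reading it there is where the
-- Python raises UnboundLocalError, excluded by Pre_ below.
def tsLoopA : List String → Int → Int → Int → Int → Option String → List Int
  | [], _, _, _, _, _ => []
  | sym :: rest, dr, dcur, irun, drun, prevsym =>
    if sym = "d" then
      let drun' := drun + 1
      let tri := dcur + (dr - 1) * irun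
      tri :: tsLoopA rest dr dcur irun drun' (some sym)
    else
      if prevsym = some "d" then
        let dcur' := dcur + (dr - 1) * irun
        let dr' := dr - drun
        let irun' := (0 : Int) + 1
        let tri := PySem.Int.floordiv (dr' * (dr' - 1)) 2
        tri :: tsLoopA rest dr' dcur' irun' 0 (some sym)
      else
        let irun' := irun + 1
        let tri := PySem.Int.floordiv (dr * (dr - 1)) 2
        tri :: tsLoopA rest dr dcur irun' drun (some sym)

def triangle_sequence (creation_sequence : List String) : List Int :=
  let dr : Int := PySem.List.count creation_sequence "d"
  let dcur : Int := PySem.Int.floordiv ((dr - 1) * (dr - 2)) 2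
  tsLoopA creation_sequence dr dcur 0 0 none

-- ===== PORT B =====
-- B's loop state: position x, sp = sum of positions of earlier d's, seen = earlier d's.
def tsLoopB : List String → Int → Int → Int → Int → List Int
  | [], _, _, _, _ => []
  | sym :: rest, x, sp, seen, total =>
    if sym = "d" then
      let da := total - seen - 1
      let tri := sp + x * da + PySem.Int.floordiv (da * (da - 1)) 2
      tri :: tsLoopB rest (x + 1) (sp + x) (seen + 1) total
    else
      let da := total - seen
      let tri := PySem.Int.floordiv (da * (da - 1)) 2
      tri :: tsLoopB rest (x + 1) sp seen total

def triangle_sequence_alt (creation_sequence : List String) : List Int :=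
  -- Python B raises ValueError when a nonempty sequence does not start with "d" (outside
  -- Pre_ below); the port carries out the same loop there, exact wherever B returns.
  let total : Int := PySem.List.count creation_sequence "d"
  tsLoopB creation_sequence 0 0 0 total

-- ===== PRECONDITION & SPEC =====
-- Pre_ excludes exactly the inputs where Python A raises UnboundLocalError (and B its
-- ValueError): a nonempty sequence whose first symbol is not "d".
def Pre_triangle_sequence (creation_sequence : List String) : Prop :=
  creation_sequence = [] ∨ creation_sequence.head? = some "d"
instance (creation_sequence : List String) : Decidable (Pre_triangle_sequence creation_sequence) := by
  unfold Pre_triangle_sequence; infer_instance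

def pvWitness_triangle_sequence : List String := ["d", "i", "d", "d", "i"]

def Spec_triangle_sequence (creation_sequence : List String) (out : List Int) : Prop :=
  out = triangle_sequence_alt creation_sequence
instance (creation_sequence : List String) (out : List Int) : Decidable (Spec_triangle_sequence creation_sequence out) := by
  unfold Spec_triangle_sequence; infer_instance

-- ===== CLAIM (what is proved, stated in full; the proofs are below) =====
def Claim_equal_triangle_sequence : Prop := ∀ (creation_sequence : List String), Dom_triangle_sequence creation_sequence → Pre_triangle_sequence creation_sequence → Spec_triangle_sequence creation_sequence (triangle_sequence creation_sequence)

-- ===== LEMMAS AND PROOFS =====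

-- c2 m = m*(m-1) // 2, the shared triangle-number expression of both ports.
def c2 (m : Int) : Int := PySem.Int.floordiv (m * (m - 1)) 2

lemma c2_two_mul (m : Int) : 2 * c2 m = m * (m - 1) := by
  obtain ⟨k, hk⟩ : Even (m * (m - 1)) := Int.even_mul_pred_self m
  have hk' : m * (m - 1) = 2 * k := by omega
  have : c2 m = k := by
    unfold c2
    rw [hk', PySem.Int.floordiv_eq_iff_of_pos (by omega)]
    constructor <;> nlinarith
  omega

lemma c2_pred (m : Int) : c2 m = c2 (m - 1) + (m - 1) := by
  have h1 := c2_two_mul m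
  have h2 := c2_two_mul (m - 1)
  have h3 : 2 * c2 m = 2 * c2 (m - 1) + 2 * (m - 1) := by linear_combination h1 - h2
  omega

-- countD l = number of "d" symbols in l, as an Int.
def countD (l : List String) : Int := PySem.List.count l "d"

lemma countD_cons_d (rest : List String) (sym : String) (h : sym = "d") :
    countD (sym :: rest) = countD rest + 1 := by
  subst h
  simp [countD, PySem.List.count]

lemma countD_cons_nd (rest : List String) (sym : String) (h : ¬ sym = "d") :
    countD (sym :: rest) = countD rest := by
  simp [countD, PySem.List.count, h]

-- Main invariant: A's run-based state and B's prefix-sum state produce the same list.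
-- E is the key equation: dcur + (dr-1)*irun = sp + x*(D-1) + c2 (D-1) where D = countD l.
lemma loop_eq (l : List String) : ∀ (x sp seen total dr dcur irun drun : Int) (prevsym : Option String),
    total = seen + countD l →
    ((prevsym = some "d" ∧ dr = drun + countD l) ∨ (prevsym ≠ some "d" ∧ dr = countD l ∧ drun = 0)) →
    dcur + (dr - 1) * irun = sp + x * (countD l - 1) + c2 (countD l - 1) →
    tsLoopA l dr dcur irun drun prevsym = tsLoopB l x sp seen total := by
  induction l with
  | nil => intros; rfl
  | cons sym rest ih =>
    intro x sp seen total dr dcur irun drun prevsym htot hcase hE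
    by_cases hd : sym = "d"
    · have hc := countD_cons_d rest sym hd
      simp only [tsLoopA, tsLoopB, if_pos hd]
      congr 1
      · -- heads equal
        have hda : total - seen - 1 = countD (sym :: rest) - 1 := by omega
        rw [hE, hda]
        rfl
      · -- tails: apply IH
        apply ih (x + 1) (sp + x) (seen + 1) total dr dcur irun (drun + 1) (some sym)
        · omega
        · left
          refine ⟨by rw [hd], ?_⟩
          rcases hcase with ⟨_, h⟩ | ⟨_, h, h0⟩ <;> omega
        · rw [hc] at hE
          have h1 : countD rest + 1 - 1 = countD rest := by ring
          rw [h1] at hE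
          linear_combination hE + c2_pred (countD rest)
    · have hc := countD_cons_nd rest sym hd
      simp only [tsLoopA, tsLoopB, if_neg hd]
      rcases hcase with ⟨hp, hdr⟩ | ⟨hp, hdr, hdrun⟩
      · -- previous symbol was "d": run boundary
        rw [if_pos hp]
        congr 1
        · have : dr - drun = total - seen := by omega
          rw [this]
        · apply ih (x + 1) sp seen total (dr - drun) (dcur + (dr - 1) * irun) (0 + 1) 0 (some sym)
          · omega
          · right
            refine ⟨by simp [hd], by omega, rfl⟩
          · rw [hc] at hE
            have hdr' : dr = drun + countD rest := by omega
            linear_combination hE + hdr'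
      · -- previous symbol not "d"
        rw [if_neg hp]
        congr 1
        · have : dr = total - seen := by omega
          rw [this]
        · apply ih (x + 1) sp seen total dr dcur (irun + 1) drun (some sym)
          · omega
          · right
            exact ⟨by simp [hd], by omega, hdrun⟩
          · rw [hc] at hE
            have hdr' : dr = countD rest := by omega
            linear_combination hE + hdr'

-- ===== VERDICT (by name: the statement is the Claim_ definition above) =====
theorem triangle_sequence_spec : Claim_equal_triangle_sequence := by
  intro cs _ _
  unfold Spec_triangle_sequence triangle_sequence triangle_sequence_alt
  apply loop_eq
  · simp [countD]
  · right
    exact ⟨by simp, rfl, rfl⟩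
  · simp [c2, countD]
    ring_nf
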